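-- pv_equiv track=rewrite | github.com/ithukral/Isha-Coding-Projects- | Intership Code/HW1.py | uniqueDigit
-- ===== SOURCE A (Python) =====
-- def uniqueDigit(num):
--     """
--         >>> uniqueDigit(123132)
--         False
--         >>> uniqueDigit(7264578364)
--         True
--         >>> uniqueDigit(2)
--         True
--         >>> uniqueDigit(444444)
--         False
--     """
--     #- YOUR CODE STARTS HERE
--     digits = []
--     max = 0
--
--     while num > 0:
--         digits.append(num%10) # Begin by separating and storing each number
--         if max < num%10: # Then go through each number to find max
--             max = num%10
--         num = num// 10
--
--     count = 0 # Starting at zero we see how many times max number occurs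
--     for d in digits:
--         if max == d:
--             count = count+1 # if the max number is seen more than once then we add +1
--
--     if count==1 : # once is allowed as that is the max number
--         return True
--     else:    # but if it occurs more than once then we return false
--         return False
-- ===== SOURCE B (Python) =====
-- def uniqueDigit(num):
--     counts = [0] * 10
--     n = num
--     while n > 0:
--         counts[n % 10] += 1
--         n = n // 10
--     for d in range(9, -1, -1):
--         if counts[d] > 0:
--             return counts[d] == 1
--     return False
-- ===== Notes on version B (the rewrite author's own statement) =====
-- stated objective: alternative
-- what changed: B replaces A's digit-list + running-max + second counting pass with a single pass that fills a fixed-size per-digit frequency table (no max tracked), then finds the max digit and its multiplicity by one downward scan of the buckets.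
import Mathlib
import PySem

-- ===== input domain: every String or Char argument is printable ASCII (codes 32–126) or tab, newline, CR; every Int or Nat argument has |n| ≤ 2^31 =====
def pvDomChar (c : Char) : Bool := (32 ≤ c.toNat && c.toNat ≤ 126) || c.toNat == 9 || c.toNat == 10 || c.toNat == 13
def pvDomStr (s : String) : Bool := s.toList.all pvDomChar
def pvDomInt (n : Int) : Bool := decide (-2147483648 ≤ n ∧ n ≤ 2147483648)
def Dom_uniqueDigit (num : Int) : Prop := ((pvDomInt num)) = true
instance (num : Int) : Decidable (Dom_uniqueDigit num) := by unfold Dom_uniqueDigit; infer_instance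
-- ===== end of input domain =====

-- B replaces A's digit-list + running-max + recount with a fixed-size per-digit frequency table filled
-- in one pass and a downward bucket scan (objective: alternative decomposition, constant space).


-- ===== PORT A =====
-- A's while loop: collect digits (LSB first), track the running max.
def uniqueDigitLoopA (num : Int) (digits : List Int) (mx : Int) : List Int × Int :=
  if _h : num > 0 then
    uniqueDigitLoopA (PySem.Int.floordiv num 10)
      (digits ++ [PySem.Int.mod num 10])
      (if mx < PySem.Int.mod num 10 then PySem.Int.mod num 10 else mx)
  else (digits, mx)
termination_by num.toNat
decreasing_by
  have := PySem.Int.floordiv_eq_ediv_of_pos (a := num) (b := 10) (by omega)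
  omega

def uniqueDigit (num : Int) : Bool :=
  let p := uniqueDigitLoopA num [] 0
  let count := p.1.foldl (fun c d => if p.2 == d then c + 1 else c) (0 : Int)
  if count == 1 then true else false

-- ===== PORT B =====
-- B's while loop: fill the per-digit frequency table.  counts[n % 10] += 1 is ported as
-- List.modify at index (n % 10).toNat — exact here since 0 ≤ n % 10 < 10 = len(counts).
def uniqueDigitLoopB (n : Int) (counts : List Int) : List Int :=
  if _h : n > 0 then
    uniqueDigitLoopB (PySem.Int.floordiv n 10)
      (counts.modify (PySem.Int.mod n 10).toNat (· + 1))
  else counts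
termination_by n.toNat
decreasing_by
  have := PySem.Int.floordiv_eq_ediv_of_pos (a := n) (b := 10) (by omega)
  omega

-- B's for-loop over range(9, -1, -1) with its early return.  counts[d] is ported with
-- pyGetD default 0 — exact here since 0 ≤ d ≤ 9 and len(counts) = 10.
def uniqueDigitScanB (ds : List Int) (counts : List Int) : Bool :=
  match ds with
  | [] => false
  | d :: rest =>
      if PySem.List.pyGetD counts d 0 > 0 then PySem.List.pyGetD counts d 0 == 1
      else uniqueDigitScanB rest counts

def uniqueDigit_alt (num : Int) : Bool :=
  uniqueDigitScanB (PySem.List.pyRange 9 (-1) (-1))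
    (uniqueDigitLoopB num (List.replicate 10 0))

-- ===== PRECONDITION & SPEC =====
def Spec_uniqueDigit (num : Int) (out : Bool) : Prop := out = uniqueDigit_alt num
instance (num : Int) (out : Bool) : Decidable (Spec_uniqueDigit num out) := by unfold Spec_uniqueDigit; infer_instance

-- ===== CLAIM (what is proved, stated in full; the proofs are below) =====
def Claim_equal_uniqueDigit : Prop := ∀ (num : Int), Dom_uniqueDigit num → Spec_uniqueDigit num (uniqueDigit num)

-- ===== LEMMAS AND PROOFS =====

-- The digit sequence (LSB first) both loops traverse.
def digitsOf (num : Int) : List Int :=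
  if _h : num > 0 then PySem.Int.mod num 10 :: digitsOf (PySem.Int.floordiv num 10) else []
termination_by num.toNat
decreasing_by
  have := PySem.Int.floordiv_eq_ediv_of_pos (a := num) (b := 10) (by omega)
  omega

theorem digitsOf_nonpos {num : Int} (h : ¬ num > 0) : digitsOf num = [] := by
  rw [digitsOf]; simp [h]

theorem digitsOf_pos_eq {num : Int} (h : num > 0) :
    digitsOf num = PySem.Int.mod num 10 :: digitsOf (PySem.Int.floordiv num 10) := by
  rw [digitsOf]; simp [h]

theorem mem_digitsOf_bounds {num d : Int} (hd : d ∈ digitsOf num) : 0 ≤ d ∧ d < 10 := by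
  induction num using digitsOf.induct with
  | case1 n h ih =>
      rw [digitsOf_pos_eq h] at hd
      rcases List.mem_cons.mp hd with rfl | hmem
      · exact ⟨PySem.Int.mod_nonneg _ (by omega), PySem.Int.mod_lt _ (by omega)⟩
      · exact ih hmem
  | case2 n h => rw [digitsOf_nonpos h] at hd; simp at hd

theorem digitsOf_has_pos {num : Int} (h : num > 0) : ∃ d ∈ digitsOf num, 1 ≤ d := by
  induction num using digitsOf.induct with
  | case1 n hn ih =>
      rw [digitsOf_pos_eq hn]
      by_cases h2 : PySem.Int.floordiv n 10 > 0
      · obtain ⟨d, hd, hd1⟩ := ih h2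
        exact ⟨d, List.mem_cons_of_mem _ hd, hd1⟩
      · refine ⟨PySem.Int.mod n 10, List.mem_cons_self, ?_⟩
        rw [PySem.Int.mod_eq_emod_of_pos (by omega)]
        rw [PySem.Int.floordiv_eq_ediv_of_pos (by omega)] at h2
        omega
  | case2 n hn => omega

theorem loopA_eq (num : Int) : ∀ (acc : List Int) (m : Int),
    uniqueDigitLoopA num acc m =
      (acc ++ digitsOf num, (digitsOf num).foldl (fun a d => if a < d then d else a) m) := by
  induction num using digitsOf.induct with
  | case1 n hn ih =>
      intro acc m
      rw [uniqueDigitLoopA, dif_pos hn, ih, digitsOf_pos_eq hn]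
      simp [List.foldl_cons]
  | case2 n hn =>
      intro acc m
      rw [uniqueDigitLoopA, dif_neg hn, digitsOf_nonpos hn]
      simp

theorem loopB_eq (num : Int) : ∀ (cs : List Int),
    uniqueDigitLoopB num cs =
      (digitsOf num).foldl (fun cs d => cs.modify d.toNat (· + 1)) cs := by
  induction num using digitsOf.induct with
  | case1 n hn ih =>
      intro cs
      rw [uniqueDigitLoopB, dif_pos hn, ih, digitsOf_pos_eq hn, List.foldl_cons]
  | case2 n hn =>
      intro cs
      rw [uniqueDigitLoopB, dif_neg hn, digitsOf_nonpos hn, List.foldl_nil]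

theorem foldl_max_if (L : List Int) (m : Int) :
    L.foldl (fun a d => if a < d then d else a) m = L.foldl max m := by
  induction L generalizing m with
  | nil => rfl
  | cons x t ih => simp only [List.foldl_cons, ih]; congr 1; omega

theorem getD_foldl_modify (L : List Int) (hL : ∀ d ∈ L, 0 ≤ d ∧ d < 10)
    (cs : List Int) (hlen : cs.length = 10) (j : Int) (hj0 : 0 ≤ j) (hj9 : j < 10) :
    PySem.List.pyGetD (L.foldl (fun cs d => cs.modify d.toNat (· + 1)) cs) j 0 =
      PySem.List.pyGetD cs j 0 + (L.count j : Int) := by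
  induction L generalizing cs with
  | nil => simp
  | cons x t ih =>
      have hx := hL x (List.mem_cons_self)
      rw [List.foldl_cons,
        ih (fun d hd => hL d (List.mem_cons_of_mem _ hd)) _ (by simp [hlen])]
      have hget : PySem.List.pyGetD (cs.modify x.toNat (· + 1)) j 0 =
          PySem.List.pyGetD cs j 0 + (if x = j then 1 else 0) := by
        rw [PySem.List.pyGetD_eq_getElem _ _ hj0 (by simp [hlen]; omega),
            PySem.List.pyGetD_eq_getElem _ _ hj0 (by simp [hlen]; omega)]
        rw [List.getElem_modify]
        by_cases hxj : x = j
        · subst hxj; simp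
        · have hne : x.toNat ≠ j.toNat := by omega
          simp [hne, hxj]
      rw [hget, List.count_cons]
      push_cast
      by_cases h : x = j
      · subst h; simp; omega
      · simp [h]

theorem scan_finds_max (c : List Int) (M : Int) (hM0 : 0 ≤ M) (hM9 : M ≤ 9)
    (hMc : PySem.List.pyGetD c M 0 > 0)
    (habove : ∀ j, M < j → j ≤ 9 → PySem.List.pyGetD c j 0 = 0) :
    ∀ (a : Int), M ≤ a → a ≤ 9 →
      uniqueDigitScanB (PySem.List.pyRange a (-1) (-1)) c = (PySem.List.pyGetD c M 0 == 1) := by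
  intro a hMa
  induction a, hMa using Int.le_induction with
  | base =>
      intro _
      rw [PySem.List.pyRange_neg_one_cons (by omega)]
      simp only [uniqueDigitScanB]
      rw [if_pos hMc]
  | succ n hn ih =>
      intro hle
      rw [PySem.List.pyRange_neg_one_cons (by omega)]
      simp only [uniqueDigitScanB]
      rw [if_neg (by rw [habove (n + 1) (by omega) hle]; omega)]
      have := ih (by omega)
      simpa using this

theorem scan_zero :
    uniqueDigitScanB (PySem.List.pyRange 9 (-1) (-1)) (List.replicate 10 0) = false := by
  decide

-- ===== VERDICT (by name: the statement is the Claim_ definition above) =====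
set_option maxRecDepth 8192 in
theorem uniqueDigit_spec : Claim_equal_uniqueDigit := by
  intro num _
  simp only [Spec_uniqueDigit, uniqueDigit, uniqueDigit_alt]
  rw [loopA_eq, loopB_eq]
  by_cases hpos : num > 0
  · -- positive: both compute the multiplicity of the max digit
    set L := digitsOf num with hL
    have hbounds : ∀ d ∈ L, 0 ≤ d ∧ d < 10 := fun d hd => mem_digitsOf_bounds hd
    set M := L.foldl (fun a d => if a < d then d else a) 0 with hM
    have hMmax : M = L.foldl max 0 := foldl_max_if L 0
    have hub : ∀ d ∈ L, d ≤ M := by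
      rw [hMmax]; exact (PySem.List.le_foldl_max L 0).2
    have hM1 : 1 ≤ M := by
      obtain ⟨d, hd, hd1⟩ := digitsOf_has_pos hpos
      exact le_trans hd1 (hub d hd)
    have hMmem : M ∈ L := by
      rcases PySem.List.foldl_max_mem L 0 with h | h
      · exfalso; rw [hMmax, h] at hM1; omega
      · rwa [hMmax]
    have hM9 : M ≤ 9 := by have := (hbounds M hMmem).2; omega
    have hcount : ∀ j : Int, 0 ≤ j → j < 10 →
        PySem.List.pyGetD (L.foldl (fun cs d => cs.modify d.toNat (· + 1)) (List.replicate 10 (0 : Int))) j 0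
          = (L.count j : Int) := by
      intro j h0 h9
      rw [getD_foldl_modify L hbounds _ (by simp) j h0 h9,
        PySem.List.pyGetD_eq_getElem _ _ h0 (by simp; omega)]
      rw [List.getElem_replicate]
      ring
    have hMc : PySem.List.pyGetD (L.foldl (fun cs d => cs.modify d.toNat (· + 1)) (List.replicate 10 (0 : Int))) M 0 > 0 := by
      rw [hcount M (by omega) (by omega)]
      have := List.count_pos_iff.mpr hMmem
      omega
    have habove : ∀ j, M < j → j ≤ 9 →
        PySem.List.pyGetD (L.foldl (fun cs d => cs.modify d.toNat (· + 1)) (List.replicate 10 (0 : Int))) j 0 = 0 := by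
      intro j hMj hj9
      rw [hcount j (by omega) (by omega)]
      have : j ∉ L := fun hmem => absurd (hub j hmem) (by omega)
      simp [List.count_eq_zero.mpr this]
    rw [scan_finds_max _ M (by omega) hM9 hMc habove 9 (by omega) (by omega),
      hcount M (by omega) (by omega)]
    show (if (List.foldl (fun c d => if M == d then c + 1 else c) (0 : Int) L == 1) = true
        then true else false) = ((L.count M : Int) == 1)
    have hcp : L.countP (fun d => M == d) = L.count M := by
      refine List.countP_congr ?_
      intro x _
      by_cases hx : M = x
      · subst hx; rfl
      · have h1 : (M == x) = false := by simp [hx]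
        have h2 : (x == M) = false := by simp [Ne.symm hx]
        rw [h1, h2]
    have hfc : List.foldl (fun c d => if M == d then c + 1 else c) (0 : Int) L
        = ((L.count M : Int)) := by
      rw [PySem.List.foldl_count_if (fun d => M == d) L 0, hcp]; ring
    have hb : (List.foldl (fun c d => if M == d then c + 1 else c) (0 : Int) L == 1)
        = ((L.count M : Int) == 1) := by rw [hfc]
    rw [hb]
    cases ((L.count M : Int) == 1) <;> rfl
  · -- nonpositive: no digits, both loops leave their state, both return false
    rw [digitsOf_nonpos hpos]
    simp only [List.foldl_nil, List.nil_append]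
    rw [scan_zero]
    decide
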